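-- pv_equiv track=rewrite | github.com/Aoi946/Random-Challenge | exported_classifier/stat/lib/metrics.py | _extract_tp_indices
-- ===== SOURCE A (Python) =====
-- def _extract_tp_indices(z):
--     diff = [z[i+1] - z[i] for i in range(len(z) - 1)]
--     diff = [d for d in diff if d != 0]
--     tp_indices = []
--     for i in range(1, len(diff)):
--         if diff[i - 1] * diff[i] < 0:
--             tp_indices.append(i)
--     return tp_indices
-- ===== SOURCE B (Python) =====
-- def _extract_tp_indices(z):
--     # Compact z by dropping consecutive duplicates; turning points are then
--     # exactly the strict local extrema (peaks/valleys) of the compacted sequence.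
--     w = []
--     for x in z:
--         if not w or w[-1] != x:
--             w.append(x)
--     return [i for i in range(1, len(w) - 1)
--             if (w[i - 1] < w[i] and w[i] > w[i + 1])
--             or (w[i - 1] > w[i] and w[i] < w[i + 1])]
-- ===== Notes on version B (the rewrite author's own statement) =====
-- stated objective: alternative
-- what changed: B never forms differences or sign products: it compacts z by dropping consecutive duplicates and then returns the positions that are strict local extrema (peaks/valleys) of the compacted sequence, found by three-way comparisons.
import Mathlib
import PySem

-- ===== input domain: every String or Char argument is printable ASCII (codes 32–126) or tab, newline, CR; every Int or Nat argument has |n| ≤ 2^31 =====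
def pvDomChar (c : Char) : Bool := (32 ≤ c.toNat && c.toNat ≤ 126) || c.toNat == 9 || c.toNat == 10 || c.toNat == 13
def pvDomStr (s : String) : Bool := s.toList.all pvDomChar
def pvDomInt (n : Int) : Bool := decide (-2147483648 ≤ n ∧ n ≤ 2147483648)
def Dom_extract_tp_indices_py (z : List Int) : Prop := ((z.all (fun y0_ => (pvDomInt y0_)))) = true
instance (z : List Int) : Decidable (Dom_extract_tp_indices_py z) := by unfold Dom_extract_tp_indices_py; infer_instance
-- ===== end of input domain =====

-- B drops consecutive duplicates from z and reports the strict local extrema (peaks/valleys)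
-- of the compacted sequence by three-way comparisons, with no diff lists or sign products;
-- objective: alternative. Both programs are total.

-- ===== PORT A =====
def extract_tp_indices_py (z : List Int) : List Int :=
  let diff := (PySem.List.pyRange 0 ((z.length : Int) - 1) 1).map
      (fun i => PySem.List.pyGetD z (i + 1) 0 - PySem.List.pyGetD z i 0)
  let diff2 := diff.filter (fun d => decide (d ≠ 0))
  (PySem.List.pyRange 1 (diff2.length : Int) 1).foldl
    (fun acc i =>
      if PySem.List.pyGetD diff2 (i - 1) 0 * PySem.List.pyGetD diff2 i 0 < 0
      then acc ++ [i] else acc) []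

-- ===== PORT B =====
def extract_tp_indices_py_alt (z : List Int) : List Int :=
  -- 'for x in z: if not w or w[-1] != x: w.append(x)'
  let w := z.foldl (fun w x => if w = [] ∨ PySem.List.pyGetD w (-1) 0 ≠ x then w ++ [x] else w) []
  -- '[i for i in range(1, len(w)-1) if (w[i-1] < w[i] and w[i] > w[i+1]) or (w[i-1] > w[i] and w[i] < w[i+1])]'
  (PySem.List.pyRange 1 ((w.length : Int) - 1) 1).filter
    (fun i => decide
      ((PySem.List.pyGetD w (i - 1) 0 < PySem.List.pyGetD w i 0 ∧
        PySem.List.pyGetD w i 0 > PySem.List.pyGetD w (i + 1) 0) ∨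
       (PySem.List.pyGetD w (i - 1) 0 > PySem.List.pyGetD w i 0 ∧
        PySem.List.pyGetD w i 0 < PySem.List.pyGetD w (i + 1) 0)))

-- ===== PRECONDITION & SPEC =====
def Spec_extract_tp_indices_py (z : List Int) (out : List Int) : Prop := out = extract_tp_indices_py_alt z
instance (z : List Int) (out : List Int) : Decidable (Spec_extract_tp_indices_py z out) := by unfold Spec_extract_tp_indices_py; infer_instance

-- ===== CLAIM (what is proved, stated in full; the proofs are below) =====
def Claim_equal_extract_tp_indices_py : Prop := ∀ (z : List Int), Dom_extract_tp_indices_py z → Spec_extract_tp_indices_py z (extract_tp_indices_py z)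

-- ===== LEMMAS AND PROOFS =====

-- recursive form of B's compaction loop: tail after a known last element a
def compactGo : Int → List Int → List Int
  | _, [] => []
  | a, x :: t => if x = a then compactGo a t else x :: compactGo x t

def compact : List Int → List Int
  | [] => []
  | x :: t => x :: compactGo x t

-- the list of adjacent differences (A's first comprehension, recursively)
def adjDiffs : List Int → List Int
  | [] => []
  | [_] => []
  | a :: b :: t => (b - a) :: adjDiffs (b :: t)

theorem length_adjDiffs (z : List Int) : (adjDiffs z).length = z.length - 1 := by
  induction z with
  | nil => rfl
  | cons a t ih =>
    cases t with
    | nil => rfl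
    | cons b s => simp [adjDiffs] at ih ⊢; omega

theorem adjDiffs_getElem (z : List Int) (k : Nat) (h : k < (adjDiffs z).length) :
    (adjDiffs z)[k] = z.getD (k + 1) 0 - z.getD k 0 := by
  induction z generalizing k with
  | nil => simp [adjDiffs] at h
  | cons a t ih =>
    cases t with
    | nil => simp [adjDiffs] at h
    | cons b s =>
      cases k with
      | zero => simp [adjDiffs]
      | succ k =>
        have h' : k < (adjDiffs (b :: s)).length := by
          simpa [adjDiffs] using h
        simpa [adjDiffs, List.getD] using ih k h'

theorem adjDiffs_getD (z : List Int) (k : Nat) (h : k < z.length - 1) :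
    (adjDiffs z).getD k 0 = z.getD (k + 1) 0 - z.getD k 0 := by
  have hk : k < (adjDiffs z).length := by rw [length_adjDiffs]; exact h
  rw [List.getD_eq_getElem _ _ hk]
  exact adjDiffs_getElem z k hk

-- A's diff comprehension computes adjDiffs
theorem mapRange_eq_adjDiffs (z : List Int) :
    (PySem.List.pyRange 0 ((z.length : Int) - 1) 1).map
      (fun i => PySem.List.pyGetD z (i + 1) 0 - PySem.List.pyGetD z i 0) = adjDiffs z := by
  apply List.ext_getElem
  · rw [List.length_map, PySem.List.length_pyRange_one, length_adjDiffs]; omega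
  · intro k h1 h2
    have hk : k < z.length - 1 := by
      simp [PySem.List.length_pyRange_one] at h1
      omega
    have hr : k < (PySem.List.pyRange 0 ((z.length : Int) - 1) 1).length := by
      simpa using h1
    rw [List.getElem_map, adjDiffs_getElem _ _ h2]
    simp only [PySem.List.getElem_pyRange_one, zero_add]
    rw [show ((k : Int) + 1) = ((k + 1 : Nat) : Int) by push_cast; ring]
    simp only [PySem.List.pyGetD_natCast]

-- filtering the zero diffs = taking diffs of the compacted sequence
theorem filter_adjDiffs_go (a : Int) (t : List Int) :
    (adjDiffs (a :: t)).filter (fun d => decide (d ≠ 0))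
      = adjDiffs (a :: compactGo a t) := by
  induction t generalizing a with
  | nil => rfl
  | cons x s ih =>
    by_cases hx : x = a
    · subst hx
      simp only [adjDiffs, compactGo, List.filter_cons]
      simpa using ih x
    · have hd : x - a ≠ 0 := by omega
      simp only [adjDiffs, compactGo, if_neg hx, List.filter_cons, hd, ne_eq,
        not_false_eq_true, decide_true, if_true]
      exact congrArg (List.cons (x - a)) (ih x)

theorem filter_adjDiffs (z : List Int) :
    (adjDiffs z).filter (fun d => decide (d ≠ 0)) = adjDiffs (compact z) := by
  cases z with
  | nil => rfl
  | cons a t => exact filter_adjDiffs_go a t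

-- B's append loop computes compact
theorem foldl_compact_go (l acc : List Int) (a : Int) :
    l.foldl (fun w x => if w = [] ∨ PySem.List.pyGetD w (-1) 0 ≠ x then w ++ [x] else w)
      (acc ++ [a]) = acc ++ a :: compactGo a l := by
  induction l generalizing acc a with
  | nil => simp [compactGo]
  | cons x t ih =>
    have hlast : PySem.List.pyGetD (acc ++ [a]) (-1) 0 = a :=
      PySem.List.pyGetD_neg_one_append_singleton ..
    by_cases hx : x = a
    · subst hx
      simp only [List.foldl_cons, hlast]
      rw [if_neg (by simp)]
      simpa [compactGo] using ih acc x
    · simp only [List.foldl_cons, hlast]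
      rw [if_pos (Or.inr (by simpa using Ne.symm hx))]
      have := ih (acc ++ [a]) x
      simpa [compactGo, hx] using this

theorem foldl_compact (z : List Int) :
    z.foldl (fun w x => if w = [] ∨ PySem.List.pyGetD w (-1) 0 ≠ x then w ++ [x] else w) []
      = compact z := by
  cases z with
  | nil => rfl
  | cons x t =>
    have := foldl_compact_go t [] x
    simpa [compact] using this

-- ===== VERDICT (by name: the statement is the Claim_ definition above) =====
theorem extract_tp_indices_py_spec : Claim_equal_extract_tp_indices_py := by
  intro z _
  unfold Spec_extract_tp_indices_py extract_tp_indices_py extract_tp_indices_py_alt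
  simp only [mapRange_eq_adjDiffs, filter_adjDiffs, foldl_compact,
    PySem.List.foldl_append_ite_eq_filter, List.nil_append]
  set w := compact z with hw
  -- the two ranges coincide
  have hlen : ((adjDiffs w).length : Int) = (w.length : Int) - 1 ∨ w = [] := by
    cases w with
    | nil => exact Or.inr rfl
    | cons a t => left; rw [length_adjDiffs]; simp
  have hrange : PySem.List.pyRange 1 ((adjDiffs w).length : Int) 1
      = PySem.List.pyRange 1 ((w.length : Int) - 1) 1 := by
    rcases hlen with h | h
    · rw [h]
    · rw [h]; rfl
  rw [hrange]
  apply List.filter_congr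
  intro i hi
  have hmem := (PySem.List.mem_pyRange_one).1 hi
  obtain ⟨h1, h2⟩ := hmem
  -- i = k with 1 ≤ k, k + 1 < w.length
  obtain ⟨k, rfl⟩ : ∃ k : Nat, i = (k : Nat) := ⟨i.toNat, by omega⟩
  have hk1 : 1 ≤ k := by omega
  have hk2 : k + 1 < w.length := by omega
  have e1 : (k : Int) - 1 = ((k - 1 : Nat) : Int) := by omega
  have e2 : (k : Int) + 1 = ((k + 1 : Nat) : Int) := by push_cast; ring
  rw [e1, e2]
  simp only [PySem.List.pyGetD_natCast]
  rw [adjDiffs_getD w (k - 1) (by omega), adjDiffs_getD w k (by omega)]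
  have ek : k - 1 + 1 = k := by omega
  rw [ek]
  rw [decide_eq_decide, mul_neg_iff]
  set a := w.getD (k - 1) 0
  set b := w.getD k 0
  set c := w.getD (k + 1) 0
  constructor <;> intro h <;> [skip; skip] <;> omega
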